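-- pv_equiv track=rewrite | github.com/sanjana990/ocr-backend | app/services/qr_service.py | parse_vcard
-- ===== SOURCE A (Python) =====
-- def parse_vcard(vcard_data: str) -> dict:
--     """Parse vCard format QR code"""
--     vcard_info = {}
--     lines = vcard_data.split('\n')
--
--     for line in lines:
--         line = line.strip()
--         if line.startswith('FN:'):
--             vcard_info['name'] = line[3:]
--         elif line.startswith('ORG:'):
--             vcard_info['company'] = line[4:]
--         elif line.startswith('TEL:'):
--             vcard_info['phone'] = line[4:]
--         elif line.startswith('EMAIL:'):
--             vcard_info['email'] = line[6:]
--         elif line.startswith('URL:'):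
--             vcard_info['website'] = line[4:]
--         elif line.startswith('ADR:'):
--             vcard_info['address'] = line[4:]
--
--     return vcard_info
-- ===== SOURCE B (Python) =====
-- _FIELDS = {'FN': 'name', 'ORG': 'company', 'TEL': 'phone',
--            'EMAIL': 'email', 'URL': 'website', 'ADR': 'address'}
--
-- def parse_vcard(vcard_data: str) -> dict:
--     """Parse vCard format QR code"""
--     vcard_info = {}
--     for line in vcard_data.split('\n'):
--         parts = line.strip().split(':', 1)
--         if len(parts) == 2 and parts[0] in _FIELDS:
--             vcard_info[_FIELDS[parts[0]]] = parts[1]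
--     return vcard_info
-- ===== Notes on version B (the rewrite author's own statement) =====
-- stated objective: idiomatic
-- what changed: Replaces A's if/elif chain of startswith tests with hard-coded slice offsets by splitting each stripped line at its first colon (maxsplit 1) and looking the tag up in a constant tag-to-key table.
import Mathlib
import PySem

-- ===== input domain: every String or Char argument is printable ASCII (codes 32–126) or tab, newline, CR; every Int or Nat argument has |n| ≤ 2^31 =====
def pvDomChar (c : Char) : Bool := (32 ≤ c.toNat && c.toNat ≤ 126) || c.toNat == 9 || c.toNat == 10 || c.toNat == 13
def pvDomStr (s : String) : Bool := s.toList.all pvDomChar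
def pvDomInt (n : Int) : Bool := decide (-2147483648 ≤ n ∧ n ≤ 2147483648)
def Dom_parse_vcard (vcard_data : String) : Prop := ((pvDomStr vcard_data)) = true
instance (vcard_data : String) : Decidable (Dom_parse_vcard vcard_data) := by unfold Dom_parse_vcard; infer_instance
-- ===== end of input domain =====

-- B replaces A's if/elif startswith-and-slice chain by tokenizing each line with split(':', 1)
-- and a constant tag→key table lookup (objective: idiomatic; same cost).

-- ===== PORT A =====
-- loop body of A's for-loop (strip, then the startswith/slice elif chain)
def parse_vcard_step (d : PySem.Dict String String) (line0 : List Char) : PySem.Dict String String :=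
  -- 'line = line.strip()' inlined as 'PySem.Chars.strip line0'
  if PySem.Chars.startswith (PySem.Chars.strip line0) "FN:".toList then
    d.insert "name" (String.ofList (PySem.Chars.slice (PySem.Chars.strip line0) (some 3) none))
  else if PySem.Chars.startswith (PySem.Chars.strip line0) "ORG:".toList then
    d.insert "company" (String.ofList (PySem.Chars.slice (PySem.Chars.strip line0) (some 4) none))
  else if PySem.Chars.startswith (PySem.Chars.strip line0) "TEL:".toList then
    d.insert "phone" (String.ofList (PySem.Chars.slice (PySem.Chars.strip line0) (some 4) none))
  else if PySem.Chars.startswith (PySem.Chars.strip line0) "EMAIL:".toList then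
    d.insert "email" (String.ofList (PySem.Chars.slice (PySem.Chars.strip line0) (some 6) none))
  else if PySem.Chars.startswith (PySem.Chars.strip line0) "URL:".toList then
    d.insert "website" (String.ofList (PySem.Chars.slice (PySem.Chars.strip line0) (some 4) none))
  else if PySem.Chars.startswith (PySem.Chars.strip line0) "ADR:".toList then
    d.insert "address" (String.ofList (PySem.Chars.slice (PySem.Chars.strip line0) (some 4) none))
  else d

def parse_vcard (vcard_data : String) : List (String × String) :=
  ((PySem.Chars.splitOn vcard_data.toList ['\n']).foldl parse_vcard_step PySem.Dict.empty).items

-- ===== PORT B =====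
-- the constant _FIELDS table of Source B (tag chars → output key)
def vcard_fields : PySem.Dict (List Char) String :=
  PySem.Dict.ofList [(['F','N'], "name"), (['O','R','G'], "company"), (['T','E','L'], "phone"),
    (['E','M','A','I','L'], "email"), (['U','R','L'], "website"), (['A','D','R'], "address")]

-- loop body of Source B: parts = line.strip().split(':', 1); guarded table lookup
def parse_vcard_alt_step (d : PySem.Dict String String) (line : List Char) : PySem.Dict String String :=
  match PySem.Chars.splitOnMax (PySem.Chars.strip line) [':'] 1 with
  | [key, value] =>
      match vcard_fields.get? key with
      | some outKey => d.insert outKey (String.ofList value)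
      | none => d
  | _ => d

def parse_vcard_alt (vcard_data : String) : List (String × String) :=
  ((PySem.Chars.splitOn vcard_data.toList ['\n']).foldl parse_vcard_alt_step PySem.Dict.empty).items

-- ===== PRECONDITION & SPEC =====
def Spec_parse_vcard (vcard_data : String) (out : List (String × String)) : Prop := out = parse_vcard_alt vcard_data
instance (vcard_data : String) (out : List (String × String)) : Decidable (Spec_parse_vcard vcard_data out) := by unfold Spec_parse_vcard; infer_instance

-- ===== CLAIM (what is proved, stated in full; the proofs are below) =====
def Claim_equal_parse_vcard : Prop := ∀ (vcard_data : String), Dom_parse_vcard vcard_data → Spec_parse_vcard vcard_data (parse_vcard vcard_data)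

-- ===== LEMMAS AND PROOFS =====

-- splitOnMax.go with budget 0: the rest of the string is one final piece
theorem pv_go_zero (fuel : Nat) (l cur : List Char) (acc : List (List Char)) :
    PySem.Chars.splitOnMax.go [':'] fuel 0 l cur acc = ((cur.reverse ++ l) :: acc).reverse := by
  cases fuel with
  | zero => simp [PySem.Chars.splitOnMax.go]
  | succ f => cases l <;> simp [PySem.Chars.splitOnMax.go]

-- splitOnMax.go with budget 1: split at the first colon, if any
theorem pv_go_one (fuel : Nat) (l cur : List Char) (acc : List (List Char))
    (h : l.length < fuel) :
    PySem.Chars.splitOnMax.go [':'] fuel 1 l cur acc =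
      if ':' ∈ l then
        acc.reverse ++ [cur.reverse ++ l.takeWhile (· ≠ ':'), (l.dropWhile (· ≠ ':')).tail]
      else acc.reverse ++ [cur.reverse ++ l] := by
  induction fuel generalizing l cur acc with
  | zero => omega
  | succ f ih =>
    cases l with
    | nil => simp [PySem.Chars.splitOnMax.go]
    | cons c rest =>
      by_cases hc : c = ':'
      · subst hc
        simp [PySem.Chars.splitOnMax.go, List.isPrefixOf, pv_go_zero]
      · have hpre : [':'].isPrefixOf (c :: rest) = false := by
          simp [List.isPrefixOf]; intro h; exact absurd h.symm hc
        simp only [PySem.Chars.splitOnMax.go, hpre, Bool.false_eq_true, if_false, if_neg (by omega : ¬ (1 : Nat) = 0)]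
        rw [ih rest (c :: cur) acc (by simpa using Nat.lt_of_succ_lt_succ h)]
        by_cases hm : ':' ∈ rest
        · have : ':' ∈ c :: rest := List.mem_cons_of_mem _ hm
          simp [hm, this, List.takeWhile, List.dropWhile, hc]
        · have : ¬ ':' ∈ c :: rest := by simp [hm]; exact fun h => absurd h.symm hc
          simp [hm, this]

-- split(':', 1): one final piece if no colon, else the part before / after the first colon
theorem pv_splitOnMax_one (t : List Char) :
    PySem.Chars.splitOnMax t [':'] 1 =
      if ':' ∈ t then [t.takeWhile (· ≠ ':'), (t.dropWhile (· ≠ ':')).tail]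
      else [t] := by
  have h1 : ¬ ((1 : Int) < 0) := by norm_num
  simp only [PySem.Chars.splitOnMax, if_neg h1]
  have : (1 : Int).toNat = 1 := rfl
  rw [this, pv_go_one _ _ _ _ (Nat.lt_succ_self _)]
  split <;> simp

-- dropping the tag and the colon leaves the value
theorem pv_drop_tag (a b : List Char) (c : Char) :
    List.drop (a.length + 1) (a ++ c :: b) = b := by
  induction a with
  | nil => rfl
  | cons x xs ih =>
    simp only [List.length_cons, List.cons_append, List.drop_succ_cons]
    exact ih

-- decomposition of a string containing a colon at its first colon
theorem pv_decompose (t : List Char) (h : ':' ∈ t) :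
    t = t.takeWhile (· ≠ ':') ++ ':' :: (t.dropWhile (· ≠ ':')).tail ∧
      ':' ∉ t.takeWhile (· ≠ ':') := by
  induction t with
  | nil => cases h
  | cons c rest ih =>
    by_cases hc : c = ':'
    · subst hc; simp [List.takeWhile, List.dropWhile]
    · have hm : ':' ∈ rest := by
        cases h with
        | head => exact absurd rfl hc
        | tail _ h => exact h
      obtain ⟨h1, h2⟩ := ih hm
      have hp : decide (c ≠ ':') = true := by simp [hc]
      refine ⟨?_, ?_⟩
      · simp only [List.takeWhile_cons, List.dropWhile_cons, hp, if_true, List.cons_append]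
        exact congrArg (List.cons c) h1
      · simp only [List.takeWhile_cons, hp, if_true, List.mem_cons]
        push_neg
        exact ⟨fun h => hc h.symm, h2⟩

-- a colon-free tag followed by ':' is a prefix of a ++ ':' :: b  iff  the tag is a
theorem pv_prefix_key (k a b : List Char) (hk : ':' ∉ k) (ha : ':' ∉ a) :
    (k ++ [':']).isPrefixOf (a ++ ':' :: b) = true ↔ k = a := by
  induction k generalizing a with
  | nil =>
    cases a with
    | nil => simp [List.isPrefixOf]
    | cons c a' =>
      have hc : c ≠ ':' := fun h => ha (h ▸ List.mem_cons_self)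
      simp [List.isPrefixOf]
      exact fun h => absurd h.symm hc
  | cons x k' ih =>
    have hx : x ≠ ':' := fun h => hk (h ▸ List.mem_cons_self)
    cases a with
    | nil =>
      simp [List.isPrefixOf]
      exact fun h => absurd h hx
    | cons c a' =>
      have hk' : ':' ∉ k' := fun h => hk (List.mem_cons_of_mem _ h)
      have ha' : ':' ∉ a' := fun h => ha (List.mem_cons_of_mem _ h)
      simp only [List.cons_append, List.isPrefixOf, Bool.and_eq_true, beq_iff_eq]
      rw [ih a' hk' ha']
      constructor
      · rintro ⟨h1, h2⟩; rw [h1, h2]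
      · intro h; injection h with h1 h2; exact ⟨h1, h2⟩

-- a prefix containing ':' forces ':' into the string
theorem pv_prefix_mem (p t : List Char) (hp : ':' ∈ p) (h : p.isPrefixOf t = true) : ':' ∈ t := by
  exact (List.isPrefixOf_iff_prefix.mp h).subset hp

-- the two loop bodies agree on every line
theorem pv_step_eq (d : PySem.Dict String String) (line : List Char) :
    parse_vcard_step d line = parse_vcard_alt_step d line := by
  have e1 : "FN:".toList = ['F','N',':'] := rfl
  have e2 : "ORG:".toList = ['O','R','G',':'] := rfl
  have e3 : "TEL:".toList = ['T','E','L',':'] := rfl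
  have e4 : "EMAIL:".toList = ['E','M','A','I','L',':'] := rfl
  have e5 : "URL:".toList = ['U','R','L',':'] := rfl
  have e6 : "ADR:".toList = ['A','D','R',':'] := rfl
  have hget1 : vcard_fields.get? ['F','N'] = some "name" := by decide
  have hget2 : vcard_fields.get? ['O','R','G'] = some "company" := by decide
  have hget3 : vcard_fields.get? ['T','E','L'] = some "phone" := by decide
  have hget4 : vcard_fields.get? ['E','M','A','I','L'] = some "email" := by decide
  have hget5 : vcard_fields.get? ['U','R','L'] = some "website" := by decide
  have hget6 : vcard_fields.get? ['A','D','R'] = some "address" := by decide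
  set t := PySem.Chars.strip line with ht
  by_cases hc : ':' ∈ t
  · obtain ⟨hdec, hfree⟩ := pv_decompose t hc
    set a := t.takeWhile (· ≠ ':') with hA
    set b := (t.dropWhile (· ≠ ':')).tail with hB
    have hsw : ∀ (k : List Char), ':' ∉ k →
        (PySem.Chars.startswith t (k ++ [':']) = true ↔ k = a) := by
      intro k hkf
      rw [PySem.Chars.startswith, hdec]
      exact pv_prefix_key k a b hkf hfree
    have hslice : ∀ (n : Int), n = (a.length : Int) + 1 →
        PySem.Chars.slice t (some n) none = b := by
      intro n hn
      rw [PySem.Chars.slice_eq_listSlice, PySem.List.slice_from t (by omega : (0:Int) ≤ n), hdec]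
      have h2 : n.toNat = a.length + 1 := by omega
      rw [h2]
      exact pv_drop_tag a b ':'
    have hBsplit : PySem.Chars.splitOnMax t [':'] 1 = [a, b] := by
      rw [pv_splitOnMax_one, if_pos hc]
    unfold parse_vcard_step parse_vcard_alt_step
    rw [← ht, hBsplit]
    simp only [e1, e2, e3, e4, e5, e6]
    by_cases h1 : a = ['F','N']
    · rw [if_pos (by rw [show (['F','N',':'] : List Char) = ['F','N'] ++ [':'] from rfl, hsw _ (by decide)]; exact h1.symm)]
      rw [hslice 3 (by rw [h1]; decide), h1, hget1]
    · rw [if_neg (by rw [show (['F','N',':'] : List Char) = ['F','N'] ++ [':'] from rfl, hsw _ (by decide)]; exact fun h => h1 h.symm)]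
      by_cases h2 : a = ['O','R','G']
      · rw [if_pos (by rw [show (['O','R','G',':'] : List Char) = ['O','R','G'] ++ [':'] from rfl, hsw _ (by decide)]; exact h2.symm)]
        rw [hslice 4 (by rw [h2]; decide), h2, hget2]
      · rw [if_neg (by rw [show (['O','R','G',':'] : List Char) = ['O','R','G'] ++ [':'] from rfl, hsw _ (by decide)]; exact fun h => h2 h.symm)]
        by_cases h3 : a = ['T','E','L']
        · rw [if_pos (by rw [show (['T','E','L',':'] : List Char) = ['T','E','L'] ++ [':'] from rfl, hsw _ (by decide)]; exact h3.symm)]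
          rw [hslice 4 (by rw [h3]; decide), h3, hget3]
        · rw [if_neg (by rw [show (['T','E','L',':'] : List Char) = ['T','E','L'] ++ [':'] from rfl, hsw _ (by decide)]; exact fun h => h3 h.symm)]
          by_cases h4 : a = ['E','M','A','I','L']
          · rw [if_pos (by rw [show (['E','M','A','I','L',':'] : List Char) = ['E','M','A','I','L'] ++ [':'] from rfl, hsw _ (by decide)]; exact h4.symm)]
            rw [hslice 6 (by rw [h4]; decide), h4, hget4]
          · rw [if_neg (by rw [show (['E','M','A','I','L',':'] : List Char) = ['E','M','A','I','L'] ++ [':'] from rfl, hsw _ (by decide)]; exact fun h => h4 h.symm)]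
            by_cases h5 : a = ['U','R','L']
            · rw [if_pos (by rw [show (['U','R','L',':'] : List Char) = ['U','R','L'] ++ [':'] from rfl, hsw _ (by decide)]; exact h5.symm)]
              rw [hslice 4 (by rw [h5]; decide), h5, hget5]
            · rw [if_neg (by rw [show (['U','R','L',':'] : List Char) = ['U','R','L'] ++ [':'] from rfl, hsw _ (by decide)]; exact fun h => h5 h.symm)]
              by_cases h6 : a = ['A','D','R']
              · rw [if_pos (by rw [show (['A','D','R',':'] : List Char) = ['A','D','R'] ++ [':'] from rfl, hsw _ (by decide)]; exact h6.symm)]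
                rw [hslice 4 (by rw [h6]; decide), h6, hget6]
              · rw [if_neg (by rw [show (['A','D','R',':'] : List Char) = ['A','D','R'] ++ [':'] from rfl, hsw _ (by decide)]; exact fun h => h6 h.symm)]
                have h1' : ¬ (['F','N'] : List Char) = a := fun h => h1 h.symm
                have h2' : ¬ (['O','R','G'] : List Char) = a := fun h => h2 h.symm
                have h3' : ¬ (['T','E','L'] : List Char) = a := fun h => h3 h.symm
                have h4' : ¬ (['E','M','A','I','L'] : List Char) = a := fun h => h4 h.symm
                have h5' : ¬ (['U','R','L'] : List Char) = a := fun h => h5 h.symm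
                have h6' : ¬ (['A','D','R'] : List Char) = a := fun h => h6 h.symm
                have hnone : vcard_fields.get? a = none := by
                  have hv : vcard_fields = PySem.Dict.mk [(['F','N'], "name"), (['O','R','G'], "company"),
                      (['T','E','L'], "phone"), (['E','M','A','I','L'], "email"),
                      (['U','R','L'], "website"), (['A','D','R'], "address")] := by rfl
                  rw [hv]
                  simp [h1', h2', h3', h4', h5', h6', PySem.Dict.get?]
                rw [hnone]
  · -- no colon in the line: both bodies leave the dict unchanged
    have hno : ∀ (k : List Char), ':' ∈ k → PySem.Chars.startswith t k = false := by
      intro k hk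
      rw [PySem.Chars.startswith]
      by_contra h
      exact hc (pv_prefix_mem k t hk (by revert h; cases k.isPrefixOf t <;> simp))
    unfold parse_vcard_step parse_vcard_alt_step
    rw [← ht, pv_splitOnMax_one, if_neg hc]
    rw [e1, e2, e3, e4, e5, e6]
    rw [hno ['F','N',':'] (by decide), hno ['O','R','G',':'] (by decide),
        hno ['T','E','L',':'] (by decide), hno ['E','M','A','I','L',':'] (by decide),
        hno ['U','R','L',':'] (by decide), hno ['A','D','R',':'] (by decide)]
    rfl

-- ===== VERDICT (by name: the statement is the Claim_ definition above) =====
theorem parse_vcard_spec : Claim_equal_parse_vcard := by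
  intro v _
  unfold Spec_parse_vcard parse_vcard parse_vcard_alt
  rw [show parse_vcard_step = parse_vcard_alt_step from funext fun d => funext fun l => pv_step_eq d l]
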